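-- pv_equiv track=rewrite | github.com/JaumeSanCol/TFG | experimentos/comp_topologia.py | compute_som_histogram
-- ===== SOURCE A (Python) =====
-- def compute_som_histogram(positions, labels):
--     #Convierte el SOM winner positions into a histogram (dict) per neuron position.
--     som_grid = {}
--     for pos, label in zip(positions, labels):
--         pos_tuple = tuple(pos)
--         if pos_tuple not in som_grid:
--             som_grid[pos_tuple] = {}
--         som_grid[pos_tuple][label] = som_grid[pos_tuple].get(label, 0) + 1
--     return som_grid
-- ===== SOURCE B (Python) =====
-- def compute_som_histogram(positions, labels):
--     # Gather all labels per position first, then count each distinct label once.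
--     groups = {}
--     for pos, label in zip(positions, labels):
--         groups.setdefault(tuple(pos), []).append(label)
--     return {pos: {lab: labs.count(lab) for lab in dict.fromkeys(labs)}
--             for pos, labs in groups.items()}
-- ===== Notes on version B (the rewrite author's own statement) =====
-- stated objective: alternative
-- what changed: B first groups all labels by position (one gathering pass), then builds each histogram by counting every distinct label of the group, instead of A's single streaming pass that increments nested dict counters per element.
import Mathlib
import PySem

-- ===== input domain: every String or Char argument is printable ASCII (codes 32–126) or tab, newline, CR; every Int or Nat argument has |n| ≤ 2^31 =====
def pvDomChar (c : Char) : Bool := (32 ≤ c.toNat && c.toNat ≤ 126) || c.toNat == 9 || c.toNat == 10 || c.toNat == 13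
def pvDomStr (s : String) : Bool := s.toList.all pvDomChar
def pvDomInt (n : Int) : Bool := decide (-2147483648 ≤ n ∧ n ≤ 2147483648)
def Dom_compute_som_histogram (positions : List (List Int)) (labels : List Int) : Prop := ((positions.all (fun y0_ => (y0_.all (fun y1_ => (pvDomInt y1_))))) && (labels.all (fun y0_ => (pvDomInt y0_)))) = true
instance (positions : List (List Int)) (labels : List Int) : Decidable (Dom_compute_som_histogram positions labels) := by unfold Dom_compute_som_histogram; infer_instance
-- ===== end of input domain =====

-- B gathers labels per position first, then counts each distinct label; A streams nested counter updates.

-- ===== PORT A =====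
-- for pos, label in zip(...): if pos_tuple not in som_grid: som_grid[pos_tuple] = {}; som_grid[pos_tuple][label] = get(label,0)+1
def pvStepA (g : PySem.Dict (List Int) (PySem.Dict Int Int)) (p : List Int × Int) :
    PySem.Dict (List Int) (PySem.Dict Int Int) :=
  let g1 := if g.contains p.1 then g else g.insert p.1 PySem.Dict.empty
  let inner := g1.getD p.1 PySem.Dict.empty
  g1.insert p.1 (inner.insert p.2 (inner.getD p.2 0 + 1))

def compute_som_histogram (positions : List (List Int)) (labels : List Int) : List (List Int × List (Int × Int)) :=
  ((positions.zip labels).foldl pvStepA PySem.Dict.empty).items.map (fun q => (q.1, q.2.items))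

-- ===== PORT B =====
-- {lab: labs.count(lab) for lab in dict.fromkeys(labs)}
def pvHist (labs : List Int) : List (Int × Int) :=
  ((PySem.List.dedup labs).foldl
    (fun c lab => c.insert lab ((labs.count lab : Int))) PySem.Dict.empty).items

-- groups.setdefault(tuple(pos), []).append(label)  ==  groups[k] = groups.get(k, []) + [label]
def compute_som_histogram_alt (positions : List (List Int)) (labels : List Int) : List (List Int × List (Int × Int)) :=
  let groups := (positions.zip labels).foldl
    (fun g p => g.modify p.1 [] (fun labs => labs ++ [p.2])) PySem.Dict.empty
  groups.items.map (fun q => (q.1, pvHist q.2))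

-- ===== PRECONDITION & SPEC =====
def Spec_compute_som_histogram (positions : List (List Int)) (labels : List Int) (out : List (List Int × List (Int × Int))) : Prop := out = compute_som_histogram_alt positions labels
instance (positions : List (List Int)) (labels : List Int) (out : List (List Int × List (Int × Int))) : Decidable (Spec_compute_som_histogram positions labels out) := by unfold Spec_compute_som_histogram; infer_instance

-- ===== CLAIM (what is proved, stated in full; the proofs are below) =====
def Claim_equal_compute_som_histogram : Prop := ∀ (positions : List (List Int)) (labels : List Int), Dom_compute_som_histogram positions labels → Spec_compute_som_histogram positions labels (compute_som_histogram positions labels)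

-- ===== LEMMAS AND PROOFS =====

-- A's step is an insert of the updated inner counter at key p.1
theorem pvStepA_eq (g : PySem.Dict (List Int) (PySem.Dict Int Int)) (p : List Int × Int) :
    pvStepA g p = g.insert p.1
      ((g.getD p.1 PySem.Dict.empty).insert p.2
        ((g.getD p.1 PySem.Dict.empty).getD p.2 0 + 1)) := by
  unfold pvStepA
  by_cases h : g.contains p.1 = true
  · simp [h]
  · simp only [Bool.not_eq_true] at h
    simp [h, PySem.Dict.getD_insert_self, PySem.Dict.getD_of_not_contains _ _ h,
      PySem.Dict.insert_insert_self, PySem.Dict.getD_empty]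

theorem pvFoldA_eq (l : List (List Int × Int)) (g : PySem.Dict (List Int) (PySem.Dict Int Int)) :
    l.foldl pvStepA g = l.foldl
      (fun g p => g.insert p.1
        ((g.getD p.1 PySem.Dict.empty).insert p.2
          ((g.getD p.1 PySem.Dict.empty).getD p.2 0 + 1))) g := by
  have : pvStepA = (fun g p => g.insert p.1
        ((g.getD p.1 PySem.Dict.empty).insert p.2
          ((g.getD p.1 PySem.Dict.empty).getD p.2 0 + 1))) := by
    funext g p; exact pvStepA_eq g p
  rw [this]

-- A's accumulated inner dict at key k is the counter-fold of the labels landing on k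
theorem pvGetD_foldA (l : List (List Int × Int)) (g : PySem.Dict (List Int) (PySem.Dict Int Int)) (k : List Int) :
    (l.foldl pvStepA g).getD k PySem.Dict.empty
      = ((l.filter (fun p => p.1 == k)).map (·.2)).foldl
          (fun c lab => c.insert lab (c.getD lab 0 + 1)) (g.getD k PySem.Dict.empty) := by
  induction l generalizing g with
  | nil => simp
  | cons p rest ih =>
    simp only [List.foldl_cons, ih, pvStepA_eq, List.filter_cons]
    by_cases h : p.1 = k
    · subst h; simp [PySem.Dict.getD_insert_self]
    · have : (p.1 == k) = false := by simp [h]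
      simp [this, PySem.Dict.getD_insert_of_ne _ _ _ (fun hk => h hk.symm)]

-- ===== VERDICT (by name: the statement is the Claim_ definition above) =====
theorem compute_som_histogram_spec : Claim_equal_compute_som_histogram := by
  intro positions labels _
  show _ = _
  unfold compute_som_histogram compute_som_histogram_alt
  simp only []
  set l := positions.zip labels with hl
  -- B side: keys, nodup, values of the grouping fold
  have hBnd : ((l.foldl (fun g p => g.modify p.1 [] (fun labs => labs ++ [p.2])) PySem.Dict.empty)).keys.Nodup :=
    PySem.Dict.nodup_keys_foldl_modify_key l Prod.fst [] _ PySem.Dict.empty (by simp)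
  have hAnd : ((l.foldl pvStepA PySem.Dict.empty)).keys.Nodup := by
    rw [pvFoldA_eq]
    exact PySem.Dict.nodup_keys_foldl_insert_key l Prod.fst _ PySem.Dict.empty (by simp)
  rw [PySem.Dict.items_eq_map_keys _ hAnd PySem.Dict.empty,
      PySem.Dict.items_eq_map_keys _ hBnd []]
  have hkeys : ((l.foldl pvStepA PySem.Dict.empty)).keys
      = ((l.foldl (fun g p => g.modify p.1 [] (fun labs => labs ++ [p.2])) PySem.Dict.empty)).keys := by
    rw [pvFoldA_eq, PySem.Dict.keys_foldl_insert_key, PySem.Dict.keys_foldl_modify_key]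
    rfl
  rw [hkeys]
  simp only [List.map_map]
  apply List.map_congr_left
  intro k _
  simp only [Function.comp]
  congr 1
  -- inner dicts agree: A's counter items = B's histogram of the gathered labels
  rw [pvGetD_foldA, PySem.Dict.getD_foldl_modify_append]
  simp only [PySem.Dict.getD_empty]
  set labs := ((l.filter (fun p => p.1 == k)).map (·.2)) with hlabs
  rw [PySem.Dict.foldl_insert_getD_add_one_eq_counter, PySem.Dict.items_counter]
  unfold pvHist
  simp only [List.nil_append]
  rw [PySem.Dict.items_foldl_insert_fresh (PySem.List.dedup labs) (fun a => a)
        (fun a => ((labs.count a : Int))) PySem.Dict.empty (by simp)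
        (by simp)]
  simp [PySem.List.dedup_eq_ofList, PySem.Dict.empty]
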